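-- pv_equiv track=rewrite | github.com/taehyunzzz/MoEBERT | run_scripts_in_parallel.py | create_sweep_cmd
-- ===== SOURCE A (Python) =====
-- list_task_name = [
--     "rte",
--     "cola",
--     "mrpc",
--     "sst2",
--     # "qnli",
--     # "mnli",
--     # "qqp",
--     ]
--
-- def create_sweep_cmd(
--     list_mode,
--     list_moebert_expert_num,
--     list_moebert_expert_dim,
--     list_moebert_share_importance,
--     list_moebert_target_sparsity,
--     base_port_num=6000,
-- ):
--
--     cmd_format = "bash bert_base_classification.sh {} {} {} {} {} {} {} {}"
--
--     run_id = 0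
--     commands = []
--
--     for task_name in list_task_name:
--         for mode in list_mode:
--             for moebert_expert_num in list_moebert_expert_num:
--                 for moebert_expert_dim in list_moebert_expert_dim:
--                     for moebert_share_importance in list_moebert_share_importance:
--                         for moebert_target_sparsity in list_moebert_target_sparsity:
--
--                             cuda_device = run_id % 2
--
--                             port_num = base_port_num + run_id
--                             run_id += 1
--
--                             cmd = cmd_format.format(
--                                 task_name,
--                                 cuda_device,
--                                 port_num,
--                                 mode,
--                                 moebert_expert_num,
--                                 moebert_expert_dim,
--                                 moebert_share_importance,
--                                 moebert_target_sparsity,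
--                             )
--                             commands.append(cmd)
--
--                             # Run this loop only once if not diffmoe
--                             if mode != "diffmoe" :
--                                 break
--     return commands
-- ===== SOURCE B (Python) =====
-- list_task_name = [
--     "rte",
--     "cola",
--     "mrpc",
--     "sst2",
--     ]
--
-- def create_sweep_cmd(
--     list_mode,
--     list_moebert_expert_num,
--     list_moebert_expert_dim,
--     list_moebert_share_importance,
--     list_moebert_target_sparsity,
--     base_port_num=6000,
-- ):
--     cmd_format = "bash bert_base_classification.sh {} {} {} {} {} {} {} {}"
--     # Unranking: instead of enumerating nested loops, compute the total number
--     # of commands from per-mode block widths, then decode each flat run_id into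
--     # its parameter tuple by index arithmetic (divmod + a prefix scan over the
--     # per-mode widths).  A mode other than "diffmoe" contributes a block with a
--     # single sparsity value (the break in the original after one iteration).
--     nN = len(list_moebert_expert_num)
--     nD = len(list_moebert_expert_dim)
--     nH = len(list_moebert_share_importance)
--     S = len(list_moebert_target_sparsity)
--     sel = [S if m == "diffmoe" else min(S, 1) for m in list_mode]
--     widths = [nN * nD * nH * s for s in sel]
--     W = sum(widths)
--     commands = []
--     for run_id in range(len(list_task_name) * W):
--         t, r = divmod(run_id, W)
--         j = 0
--         while r >= widths[j]:
--             r -= widths[j]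
--             j += 1
--         sS = sel[j]
--         iN, r = divmod(r, nD * nH * sS)
--         iD, r = divmod(r, nH * sS)
--         iH, iS = divmod(r, sS)
--         commands.append(cmd_format.format(
--             list_task_name[t], run_id % 2, base_port_num + run_id,
--             list_mode[j], list_moebert_expert_num[iN],
--             list_moebert_expert_dim[iD], list_moebert_share_importance[iH],
--             list_moebert_target_sparsity[iS]))
--     return commands
-- ===== Notes on version B (the rewrite author's own statement) =====
-- stated objective: alternative
-- what changed: Replaces the six nested loops with a mutable counter and a break by unranking: it computes per-mode block widths and the total command count up front, then decodes each flat run_id into its parameter tuple by divmod index arithmetic plus a prefix scan over the per-mode widths, indexing directly into the input lists.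
import Mathlib
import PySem

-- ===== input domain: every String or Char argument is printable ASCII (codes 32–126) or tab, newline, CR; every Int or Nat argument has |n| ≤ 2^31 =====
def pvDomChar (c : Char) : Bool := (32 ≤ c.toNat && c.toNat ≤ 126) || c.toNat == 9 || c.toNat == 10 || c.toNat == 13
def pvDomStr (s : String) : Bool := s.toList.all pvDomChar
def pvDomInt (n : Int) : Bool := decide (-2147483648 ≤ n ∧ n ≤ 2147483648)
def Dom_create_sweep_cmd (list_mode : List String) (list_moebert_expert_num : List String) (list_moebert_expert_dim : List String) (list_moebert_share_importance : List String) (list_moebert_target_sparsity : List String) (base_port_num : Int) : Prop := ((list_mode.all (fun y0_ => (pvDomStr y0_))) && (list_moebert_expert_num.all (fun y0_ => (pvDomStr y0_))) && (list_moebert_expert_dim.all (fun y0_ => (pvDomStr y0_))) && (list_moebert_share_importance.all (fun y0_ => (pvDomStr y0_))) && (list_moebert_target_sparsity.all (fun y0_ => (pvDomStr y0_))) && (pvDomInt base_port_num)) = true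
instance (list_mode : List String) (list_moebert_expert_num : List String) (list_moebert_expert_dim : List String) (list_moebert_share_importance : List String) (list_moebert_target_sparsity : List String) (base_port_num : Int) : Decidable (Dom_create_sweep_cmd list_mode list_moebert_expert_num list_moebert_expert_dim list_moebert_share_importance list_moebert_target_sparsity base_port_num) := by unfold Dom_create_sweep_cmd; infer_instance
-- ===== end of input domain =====

-- B replaces A's six nested loops + mutable run_id + break by unranking: it
-- computes per-mode block widths up front and decodes each flat run_id into its
-- parameter tuple by divmod index arithmetic (alternative decomposition).

-- ===== PORT A =====
-- module-level constant list_task_name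
def pvListTaskName : List String := ["rte", "cola", "mrpc", "sst2"]

-- cmd_format.format(...) with int arguments rendered via str()
def pvFmt (task : String) (cuda port : Int) (mode num dim share sparsity : String) : String :=
  "bash bert_base_classification.sh " ++ task ++ " " ++ PySem.Int.toStr cuda ++ " " ++
    PySem.Int.toStr port ++ " " ++ mode ++ " " ++ num ++ " " ++ dim ++ " " ++ share ++ " " ++ sparsity

-- the innermost loop of A, with the break after one iteration when mode != "diffmoe"
def pvAInner (task mode num dim share : String) (base : Int) :
    List String → Int × List String → Int × List String
  | [], st => st
  | sparsity :: rest, (run_id, cmds) =>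
    let cuda_device := PySem.Int.mod run_id 2
    let port_num := base + run_id
    let cmd := pvFmt task cuda_device port_num mode num dim share sparsity
    if mode != "diffmoe" then (run_id + 1, cmds ++ [cmd])
    else pvAInner task mode num dim share base rest (run_id + 1, cmds ++ [cmd])

def create_sweep_cmd (list_mode : List String) (list_moebert_expert_num : List String) (list_moebert_expert_dim : List String) (list_moebert_share_importance : List String) (list_moebert_target_sparsity : List String) (base_port_num : Int) : List String :=
  (pvListTaskName.foldl (fun st task =>
    list_mode.foldl (fun st mode =>
      list_moebert_expert_num.foldl (fun st num =>
        list_moebert_expert_dim.foldl (fun st dim =>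
          list_moebert_share_importance.foldl (fun st share =>
            pvAInner task mode num dim share base_port_num list_moebert_target_sparsity st)
            st) st) st) st) ((0 : Int), ([] : List String))).2

-- ===== PORT B =====
-- sel entry: S if m == "diffmoe" else min(S, 1)
def pvSelLen (S : Int) (m : String) : Int := if m == "diffmoe" then S else min S 1

-- the while loop of Source B over (mode, width, sel) triples; returns (mode, sel, remaining r).
-- The [] case is unreachable whenever r < sum of the widths (proved below).
def pvPick : List (String × Int × Int) → Int → String × Int × Int
  | [], r => ("", 0, r)
  | (m, w, s) :: rest, r => if w ≤ r then pvPick rest (r - w) else (m, s, r)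

def create_sweep_cmd_alt (list_mode : List String) (list_moebert_expert_num : List String) (list_moebert_expert_dim : List String) (list_moebert_share_importance : List String) (list_moebert_target_sparsity : List String) (base_port_num : Int) : List String :=
  let nN : Int := list_moebert_expert_num.length
  let nD : Int := list_moebert_expert_dim.length
  let nH : Int := list_moebert_share_importance.length
  let S : Int := list_moebert_target_sparsity.length
  let sel := list_mode.map (pvSelLen S)
  let widths := sel.map (fun s => nN * nD * nH * s)
  let W := widths.foldl (· + ·) 0
  -- list indexing below uses pyGetD with default "": the indices are in range on
  -- every generated run_id (proved), so the default is never consulted.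
  (PySem.List.pyRange 0 ((pvListTaskName.length : Int) * W) 1).map fun run_id =>
    let t := PySem.Int.floordiv run_id W
    let r0 := PySem.Int.mod run_id W
    let p := pvPick (list_mode.zip (widths.zip sel)) r0
    let sS := p.2.1
    let iN := PySem.Int.floordiv p.2.2 (nD * nH * sS)
    let r2 := PySem.Int.mod p.2.2 (nD * nH * sS)
    let iD := PySem.Int.floordiv r2 (nH * sS)
    let r3 := PySem.Int.mod r2 (nH * sS)
    let iH := PySem.Int.floordiv r3 sS
    let iS := PySem.Int.mod r3 sS
    pvFmt (PySem.List.pyGetD pvListTaskName t "") (PySem.Int.mod run_id 2) (base_port_num + run_id)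
      p.1 (PySem.List.pyGetD list_moebert_expert_num iN "")
      (PySem.List.pyGetD list_moebert_expert_dim iD "")
      (PySem.List.pyGetD list_moebert_share_importance iH "")
      (PySem.List.pyGetD list_moebert_target_sparsity iS "")

-- ===== PRECONDITION & SPEC =====
def Spec_create_sweep_cmd (list_mode : List String) (list_moebert_expert_num : List String) (list_moebert_expert_dim : List String) (list_moebert_share_importance : List String) (list_moebert_target_sparsity : List String) (base_port_num : Int) (out : List String) : Prop := out = create_sweep_cmd_alt list_mode list_moebert_expert_num list_moebert_expert_dim list_moebert_share_importance list_moebert_target_sparsity base_port_num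
instance (list_mode : List String) (list_moebert_expert_num : List String) (list_moebert_expert_dim : List String) (list_moebert_share_importance : List String) (list_moebert_target_sparsity : List String) (base_port_num : Int) (out : List String) : Decidable (Spec_create_sweep_cmd list_mode list_moebert_expert_num list_moebert_expert_dim list_moebert_share_importance list_moebert_target_sparsity base_port_num out) := by unfold Spec_create_sweep_cmd; infer_instance

-- ===== CLAIM (what is proved, stated in full; the proofs are below) =====
def Claim_equal_create_sweep_cmd : Prop := ∀ (list_mode : List String) (list_moebert_expert_num : List String) (list_moebert_expert_dim : List String) (list_moebert_share_importance : List String) (list_moebert_target_sparsity : List String) (base_port_num : Int), Dom_create_sweep_cmd list_mode list_moebert_expert_num list_moebert_expert_dim list_moebert_share_importance list_moebert_target_sparsity base_port_num → Spec_create_sweep_cmd list_mode list_moebert_expert_num list_moebert_expert_dim list_moebert_share_importance list_moebert_target_sparsity base_port_num (create_sweep_cmd list_mode list_moebert_expert_num list_moebert_expert_dim list_moebert_share_importance list_moebert_target_sparsity base_port_num)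

-- ===== LEMMAS AND PROOFS =====

-- the effective sparsity list of one inner loop of A
def pvSel (mode : String) (lsp : List String) : List String :=
  if mode == "diffmoe" then lsp else lsp.take 1

-- row layers (proof-only): the flat stream of parameter tuples both programs emit
def pvInner (lsp : List String) (task mode num dim share : String) :
    List (String × String × String × String × String × String) :=
  (pvSel mode lsp).map fun sp => (task, mode, num, dim, share, sp)

def pvChunk (ln ld lsh lsp : List String) (task mode : String) :
    List (String × String × String × String × String × String) :=
  ln.flatMap fun num => ld.flatMap fun dim => lsh.flatMap fun share =>
    pvInner lsp task mode num dim share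

def pvTask (lm ln ld lsh lsp : List String) (task : String) :
    List (String × String × String × String × String × String) :=
  lm.flatMap (pvChunk ln ld lsh lsp task)

def pvRowsP (lm ln ld lsh lsp : List String) :
    List (String × String × String × String × String × String) :=
  pvListTaskName.flatMap (pvTask lm ln ld lsh lsp)

-- the command rendered for row r at flat position k
def pvRender (base : Int) (k : Int) (r : String × String × String × String × String × String) : String :=
  pvFmt r.1 (PySem.Int.mod k 2) (base + k) r.2.1 r.2.2.1 r.2.2.2.1 r.2.2.2.2.1 r.2.2.2.2.2

-- commands for a row list, indices starting at k
def pvEmit (base : Int) : Int → List (String × String × String × String × String × String) → List String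
  | _, [] => []
  | k, r :: rs => pvRender base k r :: pvEmit base (k + 1) rs

-- per-mode natural width pieces
def pvNS (lsp : List String) (m : String) : Nat := (pvSel m lsp).length
def pvNW (ln ld lsh lsp : List String) (m : String) : Nat :=
  ln.length * ld.length * lsh.length * pvNS lsp m

lemma pvEmit_append (base : Int) (xs ys : List (String × String × String × String × String × String)) :
    ∀ k : Int, pvEmit base k (xs ++ ys) = pvEmit base k xs ++ pvEmit base (k + xs.length) ys := by
  induction xs with
  | nil => intro k; simp [pvEmit]
  | cons x xs ih =>
    intro k
    have h : (k : Int) + ((x :: xs).length : Nat) = (k + 1) + (xs.length : Nat) := by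
      simp only [List.length_cons]; push_cast; ring
    simp only [List.cons_append, pvEmit, ih (k + 1), h]

lemma pvAInner_eq (task mode num dim share : String) (base : Int) :
    ∀ (lsp : List String) (k : Int) (cs : List String),
      pvAInner task mode num dim share base lsp (k, cs) =
        (k + ((pvInner lsp task mode num dim share).length : Int),
         cs ++ pvEmit base k (pvInner lsp task mode num dim share)) := by
  intro lsp
  induction lsp with
  | nil => intro k cs; simp [pvAInner, pvInner, pvSel, pvEmit]
  | cons sp rest ih =>
    intro k cs
    by_cases h : mode = "diffmoe"
    · subst h
      have step : pvAInner task "diffmoe" num dim share base (sp :: rest) (k, cs)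
          = pvAInner task "diffmoe" num dim share base rest
              (k + 1, cs ++ [pvFmt task (PySem.Int.mod k 2) (base + k) "diffmoe" num dim share sp]) := by
        simp [pvAInner]
      rw [step, ih]
      simp only [pvInner, pvSel, beq_self_eq_true, if_true, List.map_cons, List.length_cons, Prod.mk.injEq]
      refine ⟨by push_cast; ring, ?_⟩
      simp [pvEmit, pvRender]
    · have hb : (mode != "diffmoe") = true := by simp [bne, h]
      simp only [pvAInner, hb, if_true]
      simp [pvInner, pvSel, h, pvEmit, pvRender]

lemma pvFoldl_emit {α : Type} (base : Int)
    (f : α → List (String × String × String × String × String × String))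
    (g : Int × List String → α → Int × List String)
    (hg : ∀ (k : Int) (cs : List String) (x : α),
      g (k, cs) x = (k + ((f x).length : Int), cs ++ pvEmit base k (f x))) :
    ∀ (xs : List α) (k : Int) (cs : List String),
      xs.foldl g (k, cs) =
        (k + ((xs.flatMap f).length : Int), cs ++ pvEmit base k (xs.flatMap f)) := by
  intro xs
  induction xs with
  | nil => intro k cs; simp [pvEmit]
  | cons x xs ih =>
    intro k cs
    rw [List.foldl_cons, hg, ih, List.flatMap_cons, pvEmit_append]
    simp only [Prod.mk.injEq, List.length_append, List.append_assoc]
    exact ⟨by push_cast; ring, trivial⟩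

-- A equals the rendered flat row stream
lemma pvA_eq_emit (lm ln ld lsh lsp : List String) (base : Int) :
    create_sweep_cmd lm ln ld lsh lsp base = pvEmit base 0 (pvRowsP lm ln ld lsh lsp) := by
  unfold create_sweep_cmd
  have h5 : ∀ (task mode num dim : String) (k : Int) (cs : List String),
      lsh.foldl (fun st share => pvAInner task mode num dim share base lsp st) (k, cs) =
        (k + (((lsh.flatMap fun share => pvInner lsp task mode num dim share).length : Nat) : Int),
         cs ++ pvEmit base k (lsh.flatMap fun share => pvInner lsp task mode num dim share)) := by
    intro task mode num dim
    exact pvFoldl_emit base _ _ (fun k cs share => pvAInner_eq task mode num dim share base lsp k cs) lsh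
  have h4 : ∀ (task mode num : String) (k : Int) (cs : List String),
      ld.foldl (fun st dim => lsh.foldl (fun st share => pvAInner task mode num dim share base lsp st) st) (k, cs) =
        (k + (((ld.flatMap fun dim => lsh.flatMap fun share => pvInner lsp task mode num dim share).length : Nat) : Int),
         cs ++ pvEmit base k (ld.flatMap fun dim => lsh.flatMap fun share => pvInner lsp task mode num dim share)) := by
    intro task mode num
    exact pvFoldl_emit base _ _ (fun k cs dim => h5 task mode num dim k cs) ld
  have h3 : ∀ (task mode : String) (k : Int) (cs : List String),
      ln.foldl (fun st num => ld.foldl (fun st dim => lsh.foldl (fun st share => pvAInner task mode num dim share base lsp st) st) st) (k, cs) =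
        (k + ((pvChunk ln ld lsh lsp task mode).length : Int),
         cs ++ pvEmit base k (pvChunk ln ld lsh lsp task mode)) := by
    intro task mode
    exact pvFoldl_emit base _ _ (fun k cs num => h4 task mode num k cs) ln
  have h2 : ∀ (task : String) (k : Int) (cs : List String),
      lm.foldl (fun st mode => ln.foldl (fun st num => ld.foldl (fun st dim => lsh.foldl (fun st share => pvAInner task mode num dim share base lsp st) st) st) st) (k, cs) =
        (k + ((pvTask lm ln ld lsh lsp task).length : Int),
         cs ++ pvEmit base k (pvTask lm ln ld lsh lsp task)) := by
    intro task
    exact pvFoldl_emit base _ _ (fun k cs mode => h3 task mode k cs) lm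
  have h1 := pvFoldl_emit base (fun task => pvTask lm ln ld lsh lsp task)
    (fun st task => lm.foldl (fun st mode => ln.foldl (fun st num => ld.foldl (fun st dim => lsh.foldl (fun st share => pvAInner task mode num dim share base lsp st) st) st) st) st)
    (fun k cs task => h2 task k cs) pvListTaskName 0 []
  rw [h1]
  simp [pvRowsP]

lemma pvLen_flat_const {α β : Type} (xs : List α) (f : α → List β) (c : Nat)
    (h : ∀ x ∈ xs, (f x).length = c) : (xs.flatMap f).length = xs.length * c := by
  induction xs with
  | nil => simp
  | cons x xs ih =>
    simp only [List.flatMap_cons, List.length_append, h x (by simp), List.length_cons,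
      ih (fun y hy => h y (by simp [hy]))]
    ring

-- generic: element of a flatMap with uniform chunk width w, by divmod
lemma pvFlat_uniform {α β : Type} (f : α → List β) (w : Nat) :
    ∀ (xs : List α), (∀ x ∈ xs, (f x).length = w) → ∀ i : Nat,
      (xs.flatMap f)[i]? = xs[i / w]?.bind (fun x => (f x)[i % w]?) := by
  intro xs
  induction xs with
  | nil => intro _ i; simp
  | cons x xs ih =>
    intro h i
    by_cases hw : w = 0
    · subst hw
      have hnil : (x :: xs).flatMap f = [] := by
        apply List.eq_nil_of_length_eq_zero
        rw [pvLen_flat_const (x :: xs) f 0 (by simpa using h)]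
        simp
      have hx : f x = [] := List.eq_nil_of_length_eq_zero (h x (by simp))
      simp [hnil, hx]
    · have hw0 : 0 < w := Nat.pos_of_ne_zero hw
      simp only [List.flatMap_cons]
      by_cases hi : i < w
      · rw [List.getElem?_append_left (by rw [h x (by simp)]; exact hi)]
        simp [Nat.div_eq_of_lt hi, Nat.mod_eq_of_lt hi]
      · push Not at hi
        rw [List.getElem?_append_right (by rw [h x (by simp)]; exact hi)]
        obtain ⟨j, rfl⟩ : ∃ j, i = j + w := ⟨i - w, (Nat.sub_add_cancel hi).symm⟩
        rw [h x (by simp), Nat.add_sub_cancel, ih (fun y hy => h y (by simp [hy])) j]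
        simp [Nat.add_div_right _ hw0, Nat.add_mod_right]

-- generic: pvPick over mapped triples finds the chunk a flat index falls in
lemma pvPick_correct {β : Type} (g : String → List β) (wt : String → Nat) (sv : String → Int)
    (hg : ∀ m, (g m).length = wt m) :
    ∀ (ms : List String) (r : Nat), r < (ms.map wt).sum →
      ∃ (m : String) (r' : Nat), r' < wt m ∧ m ∈ ms ∧
        pvPick (ms.map (fun m => (m, ((wt m : Nat) : Int), sv m))) ((r : Nat) : Int) = (m, sv m, ((r' : Nat) : Int)) ∧
        (ms.flatMap g)[r]? = (g m)[r']? := by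
  intro ms
  induction ms with
  | nil => intro r hr; simp at hr
  | cons m0 rest ih =>
    intro r hr
    simp only [List.map_cons, List.sum_cons] at hr
    by_cases hlt : r < wt m0
    · refine ⟨m0, r, hlt, by simp, ?_, ?_⟩
      · simp only [List.map_cons, pvPick]
        rw [if_neg (by exact_mod_cast not_le.mpr hlt)]
      · simp only [List.flatMap_cons]
        rw [List.getElem?_append_left (by rw [hg]; exact hlt)]
    · push Not at hlt
      have hr' : r - wt m0 < (rest.map wt).sum := by omega
      obtain ⟨m, r', h1, h2, h3, h4⟩ := ih (r - wt m0) hr'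
      refine ⟨m, r', h1, by simp [h2], ?_, ?_⟩
      · simp only [List.map_cons, pvPick]
        rw [if_pos (by exact_mod_cast hlt)]
        have hcast : (r : Int) - ((wt m0 : Nat) : Int) = ((r - wt m0 : Nat) : Int) := by
          push_cast [hlt]; ring
        rw [hcast, h3]
      · simp only [List.flatMap_cons]
        rw [List.getElem?_append_right (by rw [hg]; exact hlt), hg, h4]

lemma pvZip_map_self {α β γ : Type} (xs : List α) (f : α → β) (g : α → γ) :
    xs.zip ((xs.map f).zip (xs.map g)) = xs.map (fun x => (x, f x, g x)) := by
  induction xs with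
  | nil => rfl
  | cons x xs ih => simp [ih]

lemma pvSelLen_cast (lsp : List String) (m : String) :
    pvSelLen (lsp.length : Int) m = (pvNS lsp m : Int) := by
  unfold pvSelLen pvNS pvSel
  by_cases h : m == "diffmoe" <;> simp [h, Nat.cast_min, min_comm]

lemma pvEmit_getElem? (base : Int) : ∀ (rs : List (String × String × String × String × String × String)) (k : Int) (i : Nat),
    (pvEmit base k rs)[i]? = rs[i]?.map (fun r => pvRender base (k + i) r) := by
  intro rs
  induction rs with
  | nil => intro k i; simp [pvEmit]
  | cons r rs ih =>
    intro k i
    cases i with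
    | zero => simp [pvEmit]
    | succ j =>
      have hk : (k + 1) + (j : Int) = k + ((j + 1 : Nat) : Int) := by push_cast; ring
      simp only [pvEmit, List.getElem?_cons_succ, ih (k + 1) j, hk]

lemma pvLen_chunk (ln ld lsh lsp : List String) (task mode : String) :
    (pvChunk ln ld lsh lsp task mode).length = pvNW ln ld lsh lsp mode := by
  have h3 : ∀ num dim : String,
      (lsh.flatMap fun share => pvInner lsp task mode num dim share).length
        = lsh.length * pvNS lsp mode :=
    fun num dim => pvLen_flat_const _ _ _ (fun share _ => by simp [pvInner, pvNS])
  have h2 : ∀ num : String,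
      (ld.flatMap fun dim => lsh.flatMap fun share => pvInner lsp task mode num dim share).length
        = ld.length * (lsh.length * pvNS lsp mode) :=
    fun num => pvLen_flat_const _ _ _ (fun dim _ => h3 num dim)
  have h1 := pvLen_flat_const ln
    (fun num => ld.flatMap fun dim => lsh.flatMap fun share => pvInner lsp task mode num dim share)
    (ld.length * (lsh.length * pvNS lsp mode)) (fun num _ => h2 num)
  unfold pvChunk pvNW
  rw [h1]; ring

lemma pvLen_task (lm ln ld lsh lsp : List String) (task : String) :
    (pvTask lm ln ld lsh lsp task).length = (lm.map (pvNW ln ld lsh lsp)).sum := by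
  unfold pvTask
  rw [List.length_flatMap]
  exact congrArg List.sum (List.map_congr_left (fun m _ => pvLen_chunk ln ld lsh lsp task m))

lemma pvSel_getElem? (m : String) (lsp : List String) (iS : Nat) (h : iS < (pvSel m lsp).length) :
    (pvSel m lsp)[iS]? = lsp[iS]? := by
  unfold pvSel at h ⊢
  by_cases hm : m == "diffmoe"
  · simp [hm]
  · have h1 : iS < 1 := by
      simp only [hm] at h
      exact lt_of_lt_of_le h (List.length_take_le 1 lsp)
    simp [hm, h1]

-- B equals the rendered flat row stream
lemma pvB_eq_emit (lm ln ld lsh lsp : List String) (base : Int) :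
    create_sweep_cmd_alt lm ln ld lsh lsp base = pvEmit base 0 (pvRowsP lm ln ld lsh lsp) := by
  have hsel : lm.map (pvSelLen (lsp.length : Int)) = lm.map (fun m => (pvNS lsp m : Int)) :=
    List.map_congr_left (fun m _ => pvSelLen_cast lsp m)
  have hwid : (lm.map (fun m => (pvNS lsp m : Int))).map
        (fun s => (ln.length : Int) * (ld.length : Int) * (lsh.length : Int) * s)
      = lm.map (fun m => (pvNW ln ld lsh lsp m : Int)) := by
    rw [List.map_map]
    apply List.map_congr_left
    intro m _
    simp only [Function.comp_apply]
    unfold pvNW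
    push_cast
    ring
  have hW : List.foldl (· + ·) (0 : Int) (lm.map (fun m => (pvNW ln ld lsh lsp m : Int)))
      = (((lm.map (pvNW ln ld lsh lsp)).sum : Nat) : Int) := by
    rw [PySem.List.foldl_add (lm.map (fun m => (pvNW ln ld lsh lsp m : Int))) (fun x => x) 0]
    simp only [Nat.cast_list_sum, List.map_map, zero_add]
    rfl
  set WN : Nat := (lm.map (pvNW ln ld lsh lsp)).sum with hWN
  have hT : (pvListTaskName.length : Int) * (WN : Int) = ((pvListTaskName.length * WN : Nat) : Int) := by
    push_cast; ring
  have htask_len : ∀ task ∈ pvListTaskName, (pvTask lm ln ld lsh lsp task).length = WN :=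
    fun task _ => pvLen_task lm ln ld lsh lsp task
  have hrows_len : (pvRowsP lm ln ld lsh lsp).length = pvListTaskName.length * WN := by
    unfold pvRowsP
    exact pvLen_flat_const _ _ WN htask_len
  simp only [create_sweep_cmd_alt, hsel, hwid, hW, hT]
  apply List.ext_getElem?
  intro i
  rw [pvEmit_getElem?]
  by_cases hi : i < pvListTaskName.length * WN
  · rw [PySem.List.getElem?_map_pyRange_zero _ _ _ hi]
    have hWpos : 0 < WN := by
      rcases Nat.eq_zero_or_pos WN with h | h
      · rw [h, Nat.mul_zero] at hi; omega
      · exact h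
    have htN : i / WN < pvListTaskName.length := (Nat.div_lt_iff_lt_mul hWpos).mpr hi
    have hrN : i % WN < WN := Nat.mod_lt _ hWpos
    have h0 : (pvRowsP lm ln ld lsh lsp)[i]?
        = (pvListTaskName[i / WN]?).bind (fun task => (pvTask lm ln ld lsh lsp task)[i % WN]?) := by
      simpa only [pvRowsP] using pvFlat_uniform (pvTask lm ln ld lsh lsp) WN pvListTaskName htask_len i
    obtain ⟨m, r', hr'w, hmem, hpick, hidx⟩ :=
      pvPick_correct (pvChunk ln ld lsh lsp (pvListTaskName[i / WN]'htN))
        (pvNW ln ld lsh lsp) (fun m => (pvNS lsp m : Int))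
        (fun mo => pvLen_chunk ln ld lsh lsp _ mo) lm (i % WN) (by rw [← hWN]; exact hrN)
    rw [h0, List.getElem?_eq_getElem htN]
    -- abbreviations for the natural widths and decoded indices
    have hpos : 0 < ln.length * ld.length * lsh.length * pvNS lsp m := by
      have h := Nat.lt_of_le_of_lt (Nat.zero_le r') hr'w
      simp only [pvNW] at h
      exact h
    have hfacs : ln.length ≠ 0 ∧ ld.length ≠ 0 ∧ lsh.length ≠ 0 ∧ pvNS lsp m ≠ 0 := by
      have h := Nat.pos_iff_ne_zero.mp hpos
      simp only [Ne, Nat.mul_eq_zero, not_or] at h ⊢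
      tauto
    obtain ⟨hNn, hDn, hHn, hSn⟩ := hfacs
    have hNS : 0 < pvNS lsp m := Nat.pos_of_ne_zero hSn
    have hw2pos : 0 < lsh.length * pvNS lsp m := Nat.mul_pos (Nat.pos_of_ne_zero hHn) hNS
    have hw1pos : 0 < ld.length * lsh.length * pvNS lsp m :=
      Nat.mul_pos (Nat.mul_pos (Nat.pos_of_ne_zero hDn) (Nat.pos_of_ne_zero hHn)) hNS
    have hEq1 : pvNW ln ld lsh lsp m = ln.length * (ld.length * lsh.length * pvNS lsp m) := by
      unfold pvNW; ring
    have hEq2 : ld.length * lsh.length * pvNS lsp m = ld.length * (lsh.length * pvNS lsp m) :=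
      Nat.mul_assoc _ _ _
    have hiN : r' / (ld.length * lsh.length * pvNS lsp m) < ln.length :=
      (Nat.div_lt_iff_lt_mul hw1pos).mpr (hEq1 ▸ hr'w)
    have hiD : r' % (ld.length * lsh.length * pvNS lsp m) / (lsh.length * pvNS lsp m) < ld.length :=
      (Nat.div_lt_iff_lt_mul hw2pos).mpr (lt_of_lt_of_eq (Nat.mod_lt r' hw1pos) hEq2)
    have hiH : r' % (ld.length * lsh.length * pvNS lsp m) % (lsh.length * pvNS lsp m) / pvNS lsp m
        < lsh.length :=
      (Nat.div_lt_iff_lt_mul hNS).mpr (Nat.mod_lt _ hw2pos)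
    have hiS : r' % (ld.length * lsh.length * pvNS lsp m) % (lsh.length * pvNS lsp m) % pvNS lsp m
        < pvNS lsp m := Nat.mod_lt _ hNS
    have hsel_le : (pvSel m lsp).length ≤ lsp.length := by
      unfold pvSel; split
      · exact le_rfl
      · simpa [List.length_take] using Nat.min_le_right 1 lsp.length
    have hiS_lsp : r' % (ld.length * lsh.length * pvNS lsp m) % (lsh.length * pvNS lsp m) % pvNS lsp m
        < lsp.length := Nat.lt_of_lt_of_le hiS (by unfold pvNS at *; exact hsel_le)
    -- decode the row stream at r'
    have hlen3 : ∀ num dim : String,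
        (lsh.flatMap fun share => pvInner lsp pvListTaskName[i / WN] m num dim share).length
          = lsh.length * pvNS lsp m :=
      fun num dim => pvLen_flat_const _ _ _ (fun share _ => by simp [pvInner, pvNS])
    have hlen2 : ∀ num : String,
        (ld.flatMap fun dim => lsh.flatMap fun share => pvInner lsp pvListTaskName[i / WN] m num dim share).length
          = ld.length * lsh.length * pvNS lsp m := by
      intro num
      have h := pvLen_flat_const ld
        (fun dim => lsh.flatMap fun share => pvInner lsp pvListTaskName[i / WN] m num dim share)
        (lsh.length * pvNS lsp m) (fun dim _ => hlen3 num dim)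
      rw [h]; ring
    have hc1 : (pvChunk ln ld lsh lsp pvListTaskName[i / WN] m)[r']?
        = ln[r' / (ld.length * lsh.length * pvNS lsp m)]?.bind
            (fun num => ((ld.flatMap fun dim => lsh.flatMap fun share => pvInner lsp pvListTaskName[i / WN] m num dim share))[r' % (ld.length * lsh.length * pvNS lsp m)]?) := by
      simpa only [pvChunk] using
        pvFlat_uniform _ (ld.length * lsh.length * pvNS lsp m) ln (fun num _ => hlen2 num) r'
    have hc2 : ∀ num : String,
        ((ld.flatMap fun dim => lsh.flatMap fun share => pvInner lsp pvListTaskName[i / WN] m num dim share))[r' % (ld.length * lsh.length * pvNS lsp m)]?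
          = ld[r' % (ld.length * lsh.length * pvNS lsp m) / (lsh.length * pvNS lsp m)]?.bind
              (fun dim => (lsh.flatMap fun share => pvInner lsp pvListTaskName[i / WN] m num dim share)[r' % (ld.length * lsh.length * pvNS lsp m) % (lsh.length * pvNS lsp m)]?) :=
      fun num => pvFlat_uniform _ (lsh.length * pvNS lsp m) ld (fun dim _ => hlen3 num dim) _
    have hc3 : ∀ num dim : String,
        (lsh.flatMap fun share => pvInner lsp pvListTaskName[i / WN] m num dim share)[r' % (ld.length * lsh.length * pvNS lsp m) % (lsh.length * pvNS lsp m)]?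
          = lsh[r' % (ld.length * lsh.length * pvNS lsp m) % (lsh.length * pvNS lsp m) / pvNS lsp m]?.bind
              (fun share => (pvInner lsp pvListTaskName[i / WN] m num dim share)[r' % (ld.length * lsh.length * pvNS lsp m) % (lsh.length * pvNS lsp m) % pvNS lsp m]?) :=
      fun num dim => pvFlat_uniform _ (pvNS lsp m) lsh (fun share _ => by simp [pvInner, pvNS]) _
    have hin : ∀ num dim share : String,
        (pvInner lsp pvListTaskName[i / WN] m num dim share)[r' % (ld.length * lsh.length * pvNS lsp m) % (lsh.length * pvNS lsp m) % pvNS lsp m]?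
          = some (pvListTaskName[i / WN], m, num, dim, share,
              lsp[r' % (ld.length * lsh.length * pvNS lsp m) % (lsh.length * pvNS lsp m) % pvNS lsp m]) := by
      intro num dim share
      simp only [pvInner, List.getElem?_map]
      rw [pvSel_getElem? m lsp _ (by unfold pvNS at hiS; exact hiS),
        List.getElem?_eq_getElem hiS_lsp, Option.map_some]
    simp only [Option.bind_some, pvTask]
    rw [hidx, hc1, List.getElem?_eq_getElem hiN, Option.bind_some,
       hc2, List.getElem?_eq_getElem hiD, Option.bind_some,
       hc3, List.getElem?_eq_getElem hiH, Option.bind_some,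
       hin, Option.map_some]
    -- the port side: rewrite the zipped triples and the Int divmods into Nat form
    have hzip := pvZip_map_self lm (fun m => ((pvNW ln ld lsh lsp m : Nat) : Int))
      (fun m => ((pvNS lsp m : Nat) : Int))
    have hw1c : ((ld.length : Int) * (lsh.length : Int) * ((pvNS lsp m : Nat) : Int))
        = ((ld.length * lsh.length * pvNS lsp m : Nat) : Int) := by push_cast; ring
    have hw2c : ((lsh.length : Int) * ((pvNS lsp m : Nat) : Int))
        = ((lsh.length * pvNS lsp m : Nat) : Int) := by push_cast; ring
    simp only [hzip, PySem.Int.floordiv_natCast, PySem.Int.mod_natCast, hpick, hw1c, hw2c,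
      PySem.List.pyGetD_natCast, pvRender]
    rw [List.getD_eq_getElem pvListTaskName "" htN, List.getD_eq_getElem ln "" hiN,
       List.getD_eq_getElem ld "" hiD, List.getD_eq_getElem lsh "" hiH,
       List.getD_eq_getElem lsp "" hiS_lsp]
    simp [zero_add]
  · rw [List.getElem?_eq_none, List.getElem?_eq_none]
    · simp
    · rw [hrows_len]; omega
    · rw [List.length_map, PySem.List.length_pyRange_one]
      omega

-- ===== VERDICT (by name: the statement is the Claim_ definition above) =====
theorem create_sweep_cmd_spec : Claim_equal_create_sweep_cmd := by
  intro lm ln ld lsh lsp base _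
  unfold Spec_create_sweep_cmd
  rw [pvA_eq_emit, pvB_eq_emit]
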